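-- pv_equiv track=rewrite | github.com/afniedermayer/frame_split | latex_frame_split.py | find_comment
-- ===== SOURCE A (Python) =====
-- def find_comment(text:str) -> int:
--     if '%' not in text:
--         return -1
--     escaped = False
--     for i, c in enumerate(text):
--         if not escaped:
--             if c == '%':
--                 return i
--             elif c == '\\':
--                 escaped = True
--         else:
--             escaped = False
--     return -1
-- ===== SOURCE B (Python) =====
-- import re
--
-- _PAT = re.compile(r'\\.|(%)', re.DOTALL)
--
-- def find_comment(text: str) -> int:
--     for m in _PAT.finditer(text):
--         if m.group(1) is not None:
--             return m.start()
--     return -1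
-- ===== Notes on version B (the rewrite author's own statement) =====
-- stated objective: idiomatic
-- what changed: Replaces the explicit escaped-flag character loop with a precompiled regex (\\. | (%) with DOTALL) scanned by finditer: escaped pairs are consumed as two-character matches, so the first captured bare % gives the answer without any state flag.
import Mathlib
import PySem

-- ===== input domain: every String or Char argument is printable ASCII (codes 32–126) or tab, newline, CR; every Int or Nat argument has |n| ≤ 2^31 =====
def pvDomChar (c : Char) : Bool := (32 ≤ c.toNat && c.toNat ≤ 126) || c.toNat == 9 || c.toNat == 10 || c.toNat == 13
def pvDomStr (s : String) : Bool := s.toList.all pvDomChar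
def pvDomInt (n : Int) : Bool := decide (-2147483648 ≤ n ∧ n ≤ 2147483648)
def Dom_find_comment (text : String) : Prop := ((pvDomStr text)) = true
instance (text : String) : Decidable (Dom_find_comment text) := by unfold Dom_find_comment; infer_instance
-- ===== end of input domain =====

-- B replaces A's escaped-flag loop by a regex scan (r'\\.|(%)', DOTALL) that consumes
-- escaped pairs as two-character matches; idiomatic, same O(n) cost. Return value only.

-- ===== PORT A =====
-- the 'for i, c in enumerate(text)' loop with the 'escaped' flag
def findCommentLoopA : List Char → Int → Bool → Int
  | [], _, _ => -1
  | c :: cs, i, escaped =>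
    if !escaped then
      if c == '%' then i
      else if c == '\\' then findCommentLoopA cs (i + 1) true
      else findCommentLoopA cs (i + 1) false
    else findCommentLoopA cs (i + 1) false

def find_comment (text : String) : Int :=
  if ('%' ∈ text.toList) then        -- "'%' not in text: return -1" guard
    findCommentLoopA text.toList 0 false
  else -1

-- ===== PORT B =====
-- hand port of the regex scan (regex is not in PySem): finditer over r'\\.|(%)' with
-- DOTALL advances two characters on a '\\'-plus-any match, one otherwise, and the first
-- captured bare '%' yields m.start(); exact on all inputs.
def findCommentScanB : List Char → Int → Int
  | [], _ => -1
  | c :: cs, i =>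
    if c == '%' then i               -- match of the capturing group (%): return m.start()
    else if c == '\\' then           -- '\\.' alternative: consume the escaped pair
      match cs with
      | [] => -1                     -- lone trailing backslash matches nothing further
      | _ :: cs' => findCommentScanB cs' (i + 2)
    else findCommentScanB cs (i + 1) -- no match at this position: scanner advances one

def find_comment_alt (text : String) : Int :=
  findCommentScanB text.toList 0

-- ===== PRECONDITION & SPEC =====
def Spec_find_comment (text : String) (out : Int) : Prop := out = find_comment_alt text
instance (text : String) (out : Int) : Decidable (Spec_find_comment text out) := by unfold Spec_find_comment; infer_instance

-- ===== CLAIM (what is proved, stated in full; the proofs are below) =====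
def Claim_equal_find_comment : Prop := ∀ (text : String), Dom_find_comment text → Spec_find_comment text (find_comment text)

-- ===== LEMMAS AND PROOFS =====

-- equation lemmas for the two recursions
theorem la_true (c : Char) (cs : List Char) (i : Int) :
    findCommentLoopA (c :: cs) i true = findCommentLoopA cs (i + 1) false := by
  rw [findCommentLoopA.eq_def]; simp

theorem la_percent (cs : List Char) (i : Int) :
    findCommentLoopA ('%' :: cs) i false = i := by
  rw [findCommentLoopA.eq_def]; simp

theorem la_slash (cs : List Char) (i : Int) :
    findCommentLoopA ('\\' :: cs) i false = findCommentLoopA cs (i + 1) true := by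
  rw [findCommentLoopA.eq_def]; simp

theorem la_other (c : Char) (cs : List Char) (i : Int) (hp : c ≠ '%') (hb : c ≠ '\\') :
    findCommentLoopA (c :: cs) i false = findCommentLoopA cs (i + 1) false := by
  rw [findCommentLoopA.eq_def]; simp [hp, hb]

theorem sb_percent (cs : List Char) (i : Int) :
    findCommentScanB ('%' :: cs) i = i := by
  rw [findCommentScanB.eq_def]; simp

theorem sb_slash_nil (i : Int) : findCommentScanB ['\\'] i = -1 := by
  rw [findCommentScanB.eq_def]; simp

theorem sb_slash_cons (d : Char) (cs : List Char) (i : Int) :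
    findCommentScanB ('\\' :: d :: cs) i = findCommentScanB cs (i + 2) := by
  rw [findCommentScanB.eq_def]; simp

theorem sb_other (c : Char) (cs : List Char) (i : Int) (hp : c ≠ '%') (hb : c ≠ '\\') :
    findCommentScanB (c :: cs) i = findCommentScanB cs (i + 1) := by
  rw [findCommentScanB.eq_def]; simp [hp, hb]

-- A's flag loop (started unescaped) equals B's pair-skipping scan, by strong induction
-- on the length of the remaining character list.
theorem loopA_eq_scanB (cs : List Char) (i : Int) :
    findCommentLoopA cs i false = findCommentScanB cs i := by
  induction hn : cs.length using Nat.strong_induction_on generalizing cs i with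
  | _ n ih =>
    match cs with
    | [] => rfl
    | c :: cs' =>
      by_cases hp : c = '%'
      · subst hp; rw [la_percent, sb_percent]
      · by_cases hb : c = '\\'
        · subst hb
          match cs' with
          | [] => rw [la_slash, sb_slash_nil]; rfl
          | d :: cs'' =>
            rw [la_slash, la_true, sb_slash_cons,
                show i + 1 + 1 = i + 2 by ring]
            exact ih cs''.length (by subst hn; simp) cs'' (i + 2) rfl
        · rw [la_other c cs' i hp hb, sb_other c cs' i hp hb]
          exact ih cs'.length (by subst hn; simp) cs' (i + 1) rfl

-- when no '%' occurs, B's scan returns -1 (matching A's early 'not in' return)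
theorem scanB_no_percent (cs : List Char) (i : Int) (h : '%' ∉ cs) :
    findCommentScanB cs i = -1 := by
  induction hn : cs.length using Nat.strong_induction_on generalizing cs i with
  | _ n ih =>
    match cs with
    | [] => rfl
    | c :: cs' =>
      have hp : c ≠ '%' := fun e => h (e ▸ List.mem_cons_self ..)
      have h' : '%' ∉ cs' := fun m => h (List.mem_cons_of_mem _ m)
      by_cases hb : c = '\\'
      · subst hb
        match cs' with
        | [] => exact sb_slash_nil i
        | d :: cs'' =>
          rw [sb_slash_cons]
          exact ih cs''.length (by subst hn; simp) cs'' (i + 2)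
            (fun m => h' (List.mem_cons_of_mem _ m)) rfl
      · rw [sb_other c cs' i hp hb]
        exact ih cs'.length (by subst hn; simp) cs' (i + 1) h' rfl

-- ===== VERDICT (by name: the statement is the Claim_ definition above) =====
theorem find_comment_spec : Claim_equal_find_comment := by
  intro text _
  unfold Spec_find_comment find_comment find_comment_alt
  split
  · exact loopA_eq_scanB _ _
  · exact (scanB_no_percent _ _ (by assumption)).symm
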